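-- pv_equiv track=rewrite | github.com/jfitz/code-stat | perl_token_builders.py | count_level
-- ===== SOURCE A (Python) =====
-- def count_level(candidate, bch, ech):
--   level = 0
--   escaped = False
--
--   for ch in candidate:
--     if ch == bch and not escaped:
--       level += 1
--
--     if ch == ech and not escaped and level > 0:
--       level -= 1
--
--     if ch == '\\':
--       escaped = not escaped
--     else:
--       escaped = False
--
--   return level
-- ===== SOURCE B (Python) =====
-- def count_level(candidate, bch, ech):
--   level = 0
--   i = 0
--   n = len(candidate)
--   while i < n:
--     ch = candidate[i]
--     if ch == bch:
--       level += 1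
--     if ch == ech and level > 0:
--       level -= 1
--     i += 2 if ch == '\\' else 1
--   return level
-- ===== Notes on version B (the rewrite author's own statement) =====
-- stated objective: alternative
-- what changed: Replaces the for-loop with a toggling escaped flag by a while loop over an explicit index where a backslash consumes (skips) the following character, jumping the index by 2.
import Mathlib
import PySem

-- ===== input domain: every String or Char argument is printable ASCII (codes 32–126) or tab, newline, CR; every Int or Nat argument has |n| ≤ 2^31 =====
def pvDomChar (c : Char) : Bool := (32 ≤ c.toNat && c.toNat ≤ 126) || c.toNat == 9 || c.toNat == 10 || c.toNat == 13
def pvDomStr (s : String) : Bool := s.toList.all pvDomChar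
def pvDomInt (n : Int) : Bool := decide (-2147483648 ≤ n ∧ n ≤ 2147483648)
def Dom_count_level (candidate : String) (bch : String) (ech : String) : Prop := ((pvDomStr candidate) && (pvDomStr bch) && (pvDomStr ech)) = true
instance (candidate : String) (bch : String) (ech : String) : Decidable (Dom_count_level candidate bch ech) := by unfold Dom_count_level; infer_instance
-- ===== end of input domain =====

-- B replaces A's escaped-flag toggle by an index walk in which a backslash consumes (skips) the
-- following character; same return value, alternative decomposition (no speed claim).

-- ===== PORT A =====
-- A's loop body: bracket checks against the current escaped flag, then the flag update.
def stepA (bch ech : String) (s : Int × Bool) (ch : Char) : Int × Bool :=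
  let level := if (String.mk [ch] == bch) && !s.2 then s.1 + 1 else s.1
  let level := if (String.mk [ch] == ech) && !s.2 && decide (level > 0) then level - 1 else level
  let escaped := if ch == '\\' then !s.2 else false
  (level, escaped)

def count_level (candidate : String) (bch : String) (ech : String) : Int :=
  (candidate.toList.foldl (stepA bch ech) ((0 : Int), false)).1

-- ===== PORT B =====
-- B's while loop: at a backslash the index jumps by 2, dropping the next character.
def goB (bch ech : String) (l : List Char) (level : Int) : Int :=
  match l with
  | [] => level
  | ch :: rest =>
    let level := if String.mk [ch] == bch then level + 1 else level
    let level := if (String.mk [ch] == ech) && decide (level > 0) then level - 1 else level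
    if ch == '\\' then goB bch ech rest.tail level else goB bch ech rest level
termination_by l.length
decreasing_by
  · simp [List.length_tail]
  · simp

def count_level_alt (candidate : String) (bch : String) (ech : String) : Int :=
  goB bch ech candidate.toList 0

-- ===== PRECONDITION & SPEC =====
def Spec_count_level (candidate : String) (bch : String) (ech : String) (out : Int) : Prop := out = count_level_alt candidate bch ech
instance (candidate : String) (bch : String) (ech : String) (out : Int) : Decidable (Spec_count_level candidate bch ech out) := by unfold Spec_count_level; infer_instance

-- ===== CLAIM (what is proved, stated in full; the proofs are below) =====
def Claim_equal_count_level : Prop := ∀ (candidate : String) (bch : String) (ech : String), Dom_count_level candidate bch ech → Spec_count_level candidate bch ech (count_level candidate bch ech)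

-- ===== LEMMAS AND PROOFS =====

-- One A-step from an escaped state: nothing counts, the flag clears.
lemma stepA_true (bch ech : String) (lvl : Int) (ch : Char) :
    stepA bch ech (lvl, true) ch = (lvl, false) := by
  simp [stepA]

-- One A-step from an unescaped state computes B's level update, flag = "was a backslash".
lemma stepA_false (bch ech : String) (lvl : Int) (ch : Char) :
    stepA bch ech (lvl, false) ch =
      (let l1 := if String.mk [ch] == bch then lvl + 1 else lvl;
       (if (String.mk [ch] == ech) && decide (l1 > 0) then l1 - 1 else l1, ch == '\\')) := by
  by_cases h : ch = '\\' <;> simp [stepA, h]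

lemma fold_eq_goB (bch ech : String) :
    ∀ n (l : List Char), l.length ≤ n → ∀ lvl : Int,
      (l.foldl (stepA bch ech) (lvl, false)).1 = goB bch ech l lvl := by
  intro n
  induction n with
  | zero =>
    intro l h lvl
    have : l = [] := List.length_eq_zero_iff.mp (Nat.le_zero.mp h)
    subst this; simp [goB]
  | succ n ih =>
    intro l h lvl
    match l with
    | [] => simp [goB]
    | ch :: rest =>
      rw [List.foldl_cons, stepA_false]
      simp only [goB]
      set lvl' := (if (String.mk [ch] == ech) &&
          decide ((if String.mk [ch] == bch then lvl + 1 else lvl) > 0) then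
          (if String.mk [ch] == bch then lvl + 1 else lvl) - 1
        else (if String.mk [ch] == bch then lvl + 1 else lvl)) with hlvl'
      by_cases hbs : ch = '\\'
      · subst hbs
        simp only [beq_self_eq_true, if_pos]
        match rest with
        | [] => simp [goB]
        | d :: rest2 =>
          rw [List.foldl_cons, stepA_true]
          simp only [List.tail_cons]
          exact ih rest2 (by simp at h; omega) lvl'
      · have hb : (ch == '\\') = false := beq_eq_false_iff_ne.mpr hbs
        simp only [hb, Bool.false_eq_true, if_false]
        exact ih rest (by simp at h; omega) lvl'

-- ===== VERDICT (by name: the statement is the Claim_ definition above) =====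
theorem count_level_spec : Claim_equal_count_level := by
  intro candidate bch ech _
  show count_level candidate bch ech = count_level_alt candidate bch ech
  exact fold_eq_goB bch ech candidate.toList.length candidate.toList le_rfl 0
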